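-- pv_equiv track=rewrite | github.com/Lee-3-8/CodingTest-Study | level3/자물쇠와_열쇠/규빈.py | pieceOfArray
-- ===== SOURCE A (Python) =====
-- def pieceOfArray(arr, flag): # 최소 조각 자르기
--     minRow = minCol = lenA = len(arr)
--     maxRow = maxCol = 0
--     for i in range(lenA):
--         for j in range(lenA):
--             if arr[i][j] == flag:
--                 minRow, minCol = min(minRow, i), min(minCol, j)
--                 maxRow, maxCol = max(maxRow, i), max(maxCol, j)
--     arr = [[arr[i][j] for j in range(minCol, maxCol + 1)] for i in range(minRow,maxRow+1)]
--     return arr, maxRow - minRow + 1, maxCol - minCol + 1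
-- ===== SOURCE B (Python) =====
-- def pieceOfArray(arr, flag):  # divide-and-conquer: merge bounding boxes of row halves, then crop with slices
--     n = len(arr)
--
--     def box(lo, hi):  # bounding box of flag cells among rows lo..hi-1 ((n, n, 0, 0) if none)
--         if hi - lo <= 0:
--             return n, n, 0, 0
--         if hi - lo == 1:
--             cols = [j for j in range(n) if arr[lo][j] == flag]
--             if cols:
--                 return lo, min(cols), lo, max(cols)
--             return n, n, 0, 0
--         mid = (lo + hi) // 2
--         a1, b1, c1, d1 = box(lo, mid)
--         a2, b2, c2, d2 = box(mid, hi)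
--         return min(a1, a2), min(b1, b2), max(c1, c2), max(d1, d2)
--
--     minRow, minCol, maxRow, maxCol = box(0, n)
--     cropped = [row[minCol:maxCol + 1] for row in arr[minRow:maxRow + 1]]
--     return cropped, maxRow - minRow + 1, maxCol - minCol + 1
-- ===== Notes on version B (the rewrite author's own statement) =====
-- stated objective: alternative
-- what changed: B computes the bounding box by recursive divide-and-conquer over row ranges (each half returns a partial box, halves merged componentwise by min/max) and crops with slices, instead of A's iterative fused scan that threads four min/max accumulators over every cell and crops by an index comprehension.
import Mathlib
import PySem

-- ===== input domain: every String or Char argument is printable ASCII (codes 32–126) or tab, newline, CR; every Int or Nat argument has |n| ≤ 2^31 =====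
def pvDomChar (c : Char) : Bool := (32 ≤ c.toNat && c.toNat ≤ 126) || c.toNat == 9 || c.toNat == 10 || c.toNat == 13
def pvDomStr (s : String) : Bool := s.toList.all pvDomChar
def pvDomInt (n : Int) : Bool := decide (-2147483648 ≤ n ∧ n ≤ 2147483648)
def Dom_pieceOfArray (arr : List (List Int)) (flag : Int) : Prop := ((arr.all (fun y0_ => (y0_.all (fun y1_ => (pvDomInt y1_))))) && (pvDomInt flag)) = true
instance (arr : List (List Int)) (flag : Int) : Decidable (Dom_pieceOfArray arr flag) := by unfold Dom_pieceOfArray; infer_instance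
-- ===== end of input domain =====

-- B computes the bounding box by recursive divide-and-conquer over row ranges (halves merged
-- componentwise by min/max) and crops with slices, instead of A's fused 4-accumulator scan and
-- index-comprehension crop; objective: alternative decomposition, same asymptotic cost.

-- ===== PORT A =====
-- literal port of A; arr[i][j] is pyGetD∘pyGetD (exact here: inside Pre_ every executed index is in range)
def pieceOfArray (arr : List (List Int)) (flag : Int) : List (List Int) × Int × Int :=
  let lenA : Int := arr.length
  let st :=
    (PySem.List.pyRange 0 lenA).foldl (fun s i =>
      (PySem.List.pyRange 0 lenA).foldl (fun s j =>
        if PySem.List.pyGetD (PySem.List.pyGetD arr i []) j 0 == flag then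
          (min s.1 i, min s.2.1 j, max s.2.2.1 i, max s.2.2.2 j)
        else s) s) (lenA, lenA, (0 : Int), (0 : Int))
  let cropped := (PySem.List.pyRange st.1 (st.2.2.1 + 1)).map (fun i =>
      (PySem.List.pyRange st.2.1 (st.2.2.2 + 1)).map (fun j =>
        PySem.List.pyGetD (PySem.List.pyGetD arr i []) j 0))
  (cropped, st.2.2.1 - st.1 + 1, st.2.2.2 - st.2.1 + 1)

-- ===== PORT B =====
-- the single-row leaf of Source B's box(): first/last flag column of row lo, or the (n,n,0,0) sentinel
def pvRowBox (arr : List (List Int)) (flag n lo : Int) : Int × Int × Int × Int :=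
  let cols := (PySem.List.pyRange 0 n).filter (fun j =>
      PySem.List.pyGetD (PySem.List.pyGetD arr lo []) j 0 == flag)
  if cols ≠ [] then
    (lo, PySem.List.minD cols (fun x => x) 0, lo, PySem.List.maxD cols (fun x => x) 0)
  else (n, n, 0, 0)

-- Source B's recursive box(lo, hi): divide-and-conquer over the row range, merging partial boxes
def pieceOfArrayBox (arr : List (List Int)) (flag n lo hi : Int) : Int × Int × Int × Int :=
  if h0 : hi - lo ≤ 0 then (n, n, 0, 0)
  else if h1 : hi - lo = 1 then pvRowBox arr flag n lo
  else
    let mid := PySem.Int.floordiv (lo + hi) 2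
    let b1 := pieceOfArrayBox arr flag n lo mid
    let b2 := pieceOfArrayBox arr flag n mid hi
    (min b1.1 b2.1, min b1.2.1 b2.2.1, max b1.2.2.1 b2.2.2.1, max b1.2.2.2 b2.2.2.2)
termination_by (hi - lo).toNat
decreasing_by
  · rw [PySem.Int.floordiv_eq_ediv_of_pos (by omega : (0:Int) < 2)]; omega
  · rw [PySem.Int.floordiv_eq_ediv_of_pos (by omega : (0:Int) < 2)]; omega

def pieceOfArray_alt (arr : List (List Int)) (flag : Int) : List (List Int) × Int × Int :=
  let n : Int := arr.length
  let b := pieceOfArrayBox arr flag n 0 n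
  let cropped := (PySem.List.slice arr (some b.1) (some (b.2.2.1 + 1))).map
      (fun row => PySem.List.slice row (some b.2.1) (some (b.2.2.2 + 1)))
  (cropped, b.2.2.1 - b.1 + 1, b.2.2.2 - b.2.1 + 1)

-- ===== PRECONDITION & SPEC =====
-- Pre_ excludes exactly the inputs where A raises IndexError: the empty grid (the final crop
-- comprehension indexes arr[0]) and grids with a row shorter than len(arr) (the scan reads arr[i][j]
-- for all i,j < len(arr)).
def Pre_pieceOfArray (arr : List (List Int)) (flag : Int) : Prop :=
  arr ≠ [] ∧ ∀ row ∈ arr, arr.length ≤ row.length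
instance (arr : List (List Int)) (flag : Int) : Decidable (Pre_pieceOfArray arr flag) := by
  unfold Pre_pieceOfArray; infer_instance
def pvWitness_pieceOfArray : List (List Int) × Int := ([[1, 2], [3, 4]], 2)

def Spec_pieceOfArray (arr : List (List Int)) (flag : Int) (out : List (List Int) × Int × Int) : Prop := out = pieceOfArray_alt arr flag
instance (arr : List (List Int)) (flag : Int) (out : List (List Int) × Int × Int) : Decidable (Spec_pieceOfArray arr flag out) := by unfold Spec_pieceOfArray; infer_instance

-- ===== CLAIM (what is proved, stated in full; the proofs are below) =====
def Claim_equal_pieceOfArray : Prop := ∀ (arr : List (List Int)) (flag : Int), Dom_pieceOfArray arr flag → Pre_pieceOfArray arr flag → Spec_pieceOfArray arr flag (pieceOfArray arr flag)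
-- ===== LEMMAS AND PROOFS =====

-- componentwise merge of two partial bounding boxes (the combine step of B's recursion)
def pvMerge (s t : Int × Int × Int × Int) : Int × Int × Int × Int :=
  (min s.1 t.1, min s.2.1 t.2.1, max s.2.2.1 t.2.2.1, max s.2.2.2 t.2.2.2)

-- invariant of A's accumulator: mins never exceed n, maxes never below 0
def pvInv (n : Int) (s : Int × Int × Int × Int) : Prop :=
  s.1 ≤ n ∧ s.2.1 ≤ n ∧ 0 ≤ s.2.2.1 ∧ 0 ≤ s.2.2.2

theorem pvMergeAssoc (a b c : Int × Int × Int × Int) :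
    pvMerge (pvMerge a b) c = pvMerge a (pvMerge b c) := by
  simp [pvMerge, min_assoc, max_assoc]

theorem pvMergeInv (n : Int) (s t : Int × Int × Int × Int) (hs : pvInv n s) :
    pvInv n (pvMerge s t) := by
  obtain ⟨h1, h2, h3, h4⟩ := hs
  exact ⟨le_trans (min_le_left _ _) h1, le_trans (min_le_left _ _) h2,
         le_trans h3 (le_max_left _ _), le_trans h4 (le_max_left _ _)⟩

theorem pvMergeSent (n : Int) (s : Int × Int × Int × Int) (hs : pvInv n s) :
    pvMerge s (n, n, 0, 0) = s := by
  obtain ⟨h1, h2, h3, h4⟩ := hs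
  simp [pvMerge, min_eq_left h1, min_eq_left h2, max_eq_left h3, max_eq_left h4]

theorem pvInnerFold (P : Int → Bool) (i : Int) (l : List Int) (s : Int × Int × Int × Int) :
    l.foldl (fun s j => if P j then (min s.1 i, min s.2.1 j, max s.2.2.1 i, max s.2.2.2 j) else s) s
      = (if l.any P then min s.1 i else s.1,
         (l.filter P).foldl min s.2.1,
         (if l.any P then max s.2.2.1 i else s.2.2.1),
         (l.filter P).foldl max s.2.2.2) := by
  induction l generalizing s with
  | nil => simp
  | cons x t ih =>
    by_cases hx : P x = true
    · simp only [List.foldl_cons, List.any_cons, List.filter_cons, hx, if_pos, Bool.true_or]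
      rw [ih]
      obtain ⟨a, b, c, d⟩ := s
      cases ht : t.any P <;> simp
    · simp only [List.foldl_cons, List.any_cons, List.filter_cons, hx, Bool.false_or]
      rw [ih]
      simp

theorem pvFoldlMinOut (t : List Int) (a b : Int) :
    t.foldl min (min a b) = min a (t.foldl min b) := by
  induction t generalizing b with
  | nil => rfl
  | cons x s ih => simp only [List.foldl_cons, min_assoc, ih]

theorem pvFoldlMaxOut (t : List Int) (a b : Int) :
    t.foldl max (max a b) = max a (t.foldl max b) := by
  induction t generalizing b with
  | nil => rfl
  | cons x s ih => simp only [List.foldl_cons, max_assoc, ih]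

theorem pvFoldMinMinD (l : List Int) (d : Int) (h : l ≠ []) :
    l.foldl min d = min d (PySem.List.minD l (fun x => x) 0) := by
  cases l with
  | nil => exact absurd rfl h
  | cons x t =>
    rw [List.foldl_cons, pvFoldlMinOut]
    simp [PySem.List.minD, PySem.List.min?_id_cons]

theorem pvFoldMaxMaxD (l : List Int) (d : Int) (h : l ≠ []) :
    l.foldl max d = max d (PySem.List.maxD l (fun x => x) 0) := by
  cases l with
  | nil => exact absurd rfl h
  | cons x t =>
    rw [List.foldl_cons, pvFoldlMaxOut]
    simp [PySem.List.maxD, PySem.List.max?_id_cons]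

theorem pvFoldlCongrInv {σ : Type} (Inv : σ → Prop) (f g : σ → Int → σ) (l : List Int)
    (hfg : ∀ s x, Inv s → x ∈ l → f s x = g s x) (hg : ∀ s x, Inv s → Inv (g s x)) :
    ∀ s, Inv s → l.foldl f s = l.foldl g s := by
  induction l with
  | nil => intro s _; rfl
  | cons x t ih =>
    intro s hs
    simp only [List.foldl_cons]
    rw [hfg s x hs List.mem_cons_self]
    exact ih (fun s x hsx hm => hfg s x hsx (List.mem_cons_of_mem _ hm)) _ (hg s x hs)

-- bounds on the midpoint of B's recursion
theorem pvMidBounds (lo hi : Int) (h : ¬ hi - lo ≤ 0) (h1 : ¬ hi - lo = 1) :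
    lo < PySem.Int.floordiv (lo + hi) 2 ∧ PySem.Int.floordiv (lo + hi) 2 < hi := by
  rw [PySem.Int.floordiv_eq_ediv_of_pos (by omega : (0:Int) < 2)]
  omega

-- every box B computes is either the sentinel or a genuine bounding box inside the range
theorem pvBoxBounds (arr : List (List Int)) (flag n : Int) :
    ∀ (k : Nat) (lo hi : Int), (hi - lo).toNat ≤ k → 0 ≤ lo → hi ≤ n →
      pieceOfArrayBox arr flag n lo hi = (n, n, 0, 0) ∨
      (let b := pieceOfArrayBox arr flag n lo hi
       lo ≤ b.1 ∧ b.1 ≤ b.2.2.1 ∧ b.2.2.1 < hi ∧ 0 ≤ b.2.1 ∧ b.2.1 ≤ b.2.2.2 ∧ b.2.2.2 < n) := by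
  intro k
  induction k with
  | zero =>
    intro lo hi hk hlo hhi
    left
    rw [pieceOfArrayBox]
    simp only [dif_pos (by omega : hi - lo ≤ 0)]
  | succ k ih =>
    intro lo hi hk hlo hhi
    rw [pieceOfArrayBox]
    by_cases h0 : hi - lo ≤ 0
    · left; simp only [dif_pos h0]
    by_cases h1 : hi - lo = 1
    · simp only [dif_neg h0, dif_pos h1]
      rw [pvRowBox]
      set cols := (PySem.List.pyRange 0 n).filter (fun j =>
        PySem.List.pyGetD (PySem.List.pyGetD arr lo []) j 0 == flag) with hcols
      by_cases hc : cols ≠ []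
      · right
        simp only [if_pos hc]
        obtain ⟨m1, hm1⟩ : ∃ m, PySem.List.min? cols (fun x => x) = some m := by
          cases h : PySem.List.min? cols (fun x => x) with
          | none => exact absurd ((PySem.List.min?_eq_none_iff _ _).mp h) hc
          | some m => exact ⟨m, rfl⟩
        obtain ⟨m2, hm2⟩ : ∃ m, PySem.List.max? cols (fun x => x) = some m := by
          cases h : PySem.List.max? cols (fun x => x) with
          | none => exact absurd ((PySem.List.max?_eq_none_iff _ _).mp h) hc
          | some m => exact ⟨m, rfl⟩
        have hd1 : PySem.List.minD cols (fun x => x) 0 = m1 := by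
          rw [PySem.List.minD, hm1]; rfl
        have hd2 : PySem.List.maxD cols (fun x => x) 0 = m2 := by
          rw [PySem.List.maxD, hm2]; rfl
        have hm1m : m1 ∈ cols := PySem.List.min?_mem hm1
        have hm2m : m2 ∈ cols := PySem.List.max?_mem hm2
        have hb1 := PySem.List.mem_pyRange_one.mp (List.mem_of_mem_filter hm1m)
        have hb2 := PySem.List.mem_pyRange_one.mp (List.mem_of_mem_filter hm2m)
        have h12 : m1 ≤ m2 := PySem.List.max?_isMax hm2 m1 hm1m
        rw [hd1, hd2]
        exact ⟨le_refl lo, le_refl lo, by omega, hb1.1, h12, hb2.2⟩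
      · left; simp only [if_neg hc]
    · simp only [dif_neg h0, dif_neg h1]
      obtain ⟨hml, hmr⟩ := pvMidBounds lo hi h0 h1
      set mid := PySem.Int.floordiv (lo + hi) 2 with hmid
      have r1 := ih lo mid (by omega) hlo (by omega)
      have r2 := ih mid hi (by omega) (by omega) hhi
      set b1 := pieceOfArrayBox arr flag n lo mid with hb1
      set b2 := pieceOfArrayBox arr flag n mid hi with hb2
      rcases r1 with r1 | r1 <;> rcases r2 with r2 | r2
      · left; rw [r1, r2]; simp [min_self, max_self]
      · right
        rw [r1]
        obtain ⟨q1, q2, q3, q4, q5, q6⟩ := r2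
        simp only
        constructor
        · exact le_min (by omega) (by omega)
        refine ⟨?_, ?_, ?_, ?_, ?_⟩
        · exact le_trans (min_le_right _ _) (le_trans q2 (le_max_right _ _))
        · exact max_lt (by omega) q3
        · exact le_min (by omega) q4
        · exact le_trans (min_le_right _ _) (le_trans q5 (le_max_right _ _))
        · exact max_lt (by omega) q6
      · right
        rw [r2]
        obtain ⟨q1, q2, q3, q4, q5, q6⟩ := r1
        simp only
        refine ⟨le_min q1 (by omega), ?_, ?_, le_min q4 (by omega), ?_, ?_⟩
        · exact le_trans (min_le_left _ _) (le_trans q2 (le_max_left _ _))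
        · exact max_lt (by omega) (by omega)
        · exact le_trans (min_le_left _ _) (le_trans q5 (le_max_left _ _))
        · exact max_lt q6 (by omega)
      · right
        obtain ⟨q1, q2, q3, q4, q5, q6⟩ := r1
        obtain ⟨p1, p2, p3, p4, p5, p6⟩ := r2
        refine ⟨le_min q1 (by omega), ?_, max_lt (by omega) p3, le_min q4 p4, ?_, max_lt q6 p6⟩
        · exact le_trans (min_le_left _ _) (le_trans q2 (le_max_left _ _))
        · exact le_trans (min_le_left _ _) (le_trans q5 (le_max_left _ _))

-- folding the per-row merge over a row range computes B's divide-and-conquer box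
theorem pvFoldBox (arr : List (List Int)) (flag n : Int) :
    ∀ (k : Nat) (lo hi : Int), (hi - lo).toNat ≤ k →
      ∀ s, pvInv n s →
        (PySem.List.pyRange lo hi).foldl (fun s i => pvMerge s (pvRowBox arr flag n i)) s
          = pvMerge s (pieceOfArrayBox arr flag n lo hi) := by
  intro k
  induction k with
  | zero =>
    intro lo hi hk s hs
    rw [PySem.List.pyRange_one_eq_nil (by omega : hi ≤ lo), pieceOfArrayBox]
    simp only [dif_pos (by omega : hi - lo ≤ 0), List.foldl_nil]
    exact (pvMergeSent n s hs).symm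
  | succ k ih =>
    intro lo hi hk s hs
    rw [pieceOfArrayBox]
    by_cases h0 : hi - lo ≤ 0
    · rw [PySem.List.pyRange_one_eq_nil (by omega : hi ≤ lo)]
      simp only [dif_pos h0, List.foldl_nil]
      exact (pvMergeSent n s hs).symm
    by_cases h1 : hi - lo = 1
    · have : hi = lo + 1 := by omega
      subst this
      rw [PySem.List.pyRange_one_singleton]
      simp only [dif_neg h0, dif_pos h1, List.foldl_cons, List.foldl_nil]
    · simp only [dif_neg h0, dif_neg h1]
      obtain ⟨hml, hmr⟩ := pvMidBounds lo hi h0 h1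
      set mid := PySem.Int.floordiv (lo + hi) 2 with hmid
      rw [PySem.List.pyRange_one_append lo mid hi (by omega) (by omega), List.foldl_append]
      rw [ih lo mid (by omega) s hs,
          ih mid hi (by omega) _ (pvMergeInv n s _ hs),
          pvMergeAssoc]
      rfl

-- A's fused scan state is exactly B's box of the whole row range
theorem pvStateEq (arr : List (List Int)) (flag : Int) :
    (PySem.List.pyRange 0 (arr.length : Int)).foldl (fun s i =>
      (PySem.List.pyRange 0 (arr.length : Int)).foldl (fun s j =>
        if PySem.List.pyGetD (PySem.List.pyGetD arr i []) j 0 == flag then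
          (min s.1 i, min s.2.1 j, max s.2.2.1 i, max s.2.2.2 j)
        else s) s) ((arr.length : Int), (arr.length : Int), (0 : Int), (0 : Int))
      = pieceOfArrayBox arr flag (arr.length : Int) 0 (arr.length : Int) := by
  set n : Int := (arr.length : Int) with hn
  have hstep :
      (fun (s : Int × Int × Int × Int) i =>
        (PySem.List.pyRange 0 n).foldl (fun s j =>
          if PySem.List.pyGetD (PySem.List.pyGetD arr i []) j 0 == flag then
            (min s.1 i, min s.2.1 j, max s.2.2.1 i, max s.2.2.2 j) else s) s)
      = (fun s i =>
        ((if (PySem.List.pyRange 0 n).any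
              (fun j => PySem.List.pyGetD (PySem.List.pyGetD arr i []) j 0 == flag)
            then min s.1 i else s.1),
         (((PySem.List.pyRange 0 n).filter
              (fun j => PySem.List.pyGetD (PySem.List.pyGetD arr i []) j 0 == flag)).foldl
            min s.2.1),
         (if (PySem.List.pyRange 0 n).any
              (fun j => PySem.List.pyGetD (PySem.List.pyGetD arr i []) j 0 == flag)
            then max s.2.2.1 i else s.2.2.1),
         (((PySem.List.pyRange 0 n).filter
              (fun j => PySem.List.pyGetD (PySem.List.pyGetD arr i []) j 0 == flag)).foldl
            max s.2.2.2))) := by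
    funext s i
    exact pvInnerFold (fun j => PySem.List.pyGetD (PySem.List.pyGetD arr i []) j 0 == flag)
      i (PySem.List.pyRange 0 n) s
  rw [hstep]
  have hEq := pvFoldlCongrInv (pvInv n)
    (fun s i =>
      ((if (PySem.List.pyRange 0 n).any
            (fun j => PySem.List.pyGetD (PySem.List.pyGetD arr i []) j 0 == flag)
          then min s.1 i else s.1),
       (((PySem.List.pyRange 0 n).filter
            (fun j => PySem.List.pyGetD (PySem.List.pyGetD arr i []) j 0 == flag)).foldl
          min s.2.1),
       (if (PySem.List.pyRange 0 n).any
            (fun j => PySem.List.pyGetD (PySem.List.pyGetD arr i []) j 0 == flag)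
          then max s.2.2.1 i else s.2.2.1),
       (((PySem.List.pyRange 0 n).filter
            (fun j => PySem.List.pyGetD (PySem.List.pyGetD arr i []) j 0 == flag)).foldl
          max s.2.2.2)))
    (fun s i => pvMerge s (pvRowBox arr flag n i))
    (PySem.List.pyRange 0 n)
    (by
      intro s i hs hi
      simp only [pvRowBox]
      set cols := (PySem.List.pyRange 0 n).filter
        (fun j => PySem.List.pyGetD (PySem.List.pyGetD arr i []) j 0 == flag) with hcols
      by_cases hc : cols ≠ []
      · have hany : (PySem.List.pyRange 0 n).any
            (fun j => PySem.List.pyGetD (PySem.List.pyGetD arr i []) j 0 == flag) = true := by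
          rcases List.exists_mem_of_ne_nil cols hc with ⟨x, hx⟩
          rw [hcols, List.mem_filter] at hx
          exact List.any_eq_true.mpr ⟨x, hx.1, hx.2⟩
        simp only [if_pos hc, hany, if_true, pvMerge]
        rw [pvFoldMinMinD cols s.2.1 hc, pvFoldMaxMaxD cols s.2.2.2 hc]
      · have hce : cols = [] := not_not.mp hc
        have hany : (PySem.List.pyRange 0 n).any
            (fun j => PySem.List.pyGetD (PySem.List.pyGetD arr i []) j 0 == flag) = false := by
          rw [← Bool.not_eq_true, List.any_eq_true]
          rintro ⟨x, hx, hpx⟩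
          have : x ∈ cols := by rw [hcols, List.mem_filter]; exact ⟨hx, hpx⟩
          simp [hce] at this
        simp only [hany, Bool.false_eq_true, if_false, hce, List.foldl_nil]
        exact (pvMergeSent n s hs).symm)
    (fun s i hs => pvMergeInv n s _ hs)
    ((n, n, 0, 0)) ⟨le_refl n, le_refl n, le_refl 0, le_refl 0⟩
  rw [hEq, pvFoldBox arr flag n (n - 0).toNat 0 n (le_refl _) _
        ⟨le_refl n, le_refl n, le_refl 0, le_refl 0⟩]
  rcases pvBoxBounds arr flag n (n - 0).toNat 0 n (le_refl _) (le_refl 0) (le_refl n) with h | h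
  · rw [h]; simp [pvMerge, min_self, max_self]
  · obtain ⟨q1, q2, q3, q4, q5, q6⟩ := h
    set b := pieceOfArrayBox arr flag n 0 n with hb
    have : pvInv n b ∧ b.1 ≤ n ∧ b.2.1 ≤ n := by
      constructor
      · exact ⟨by omega, by omega, by omega, by omega⟩
      · exact ⟨by omega, by omega⟩
    simp only [pvMerge]
    obtain ⟨⟨i1, i2, i3, i4⟩, j1, j2⟩ := this
    rw [min_eq_right j1, min_eq_right j2, max_eq_right (by omega), max_eq_right (by omega)]

theorem pvMapRangeSlice {α : Type} (xs : List α) (a b : Int) (dv : α)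
    (h0 : 0 ≤ a) (h1 : a ≤ b) (h2 : b ≤ (xs.length : Int)) :
    (PySem.List.pyRange a b).map (fun j => PySem.List.pyGetD xs j dv)
      = PySem.List.slice xs (some a) (some b) := by
  rw [PySem.List.slice_toNat xs h0 (le_trans h0 h1)]
  have hfull := PySem.List.map_pyGetD_pyRange' xs dv h0
  rw [PySem.List.pyRange_one_append a b (xs.length : Int) h1 h2, List.map_append,
      PySem.List.map_pyGetD_pyRange' xs dv (le_trans h0 h1)] at hfull
  have hlen : ((PySem.List.pyRange a b).map (fun j => PySem.List.pyGetD xs j dv)).length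
      = b.toNat - a.toNat := by
    rw [List.length_map, PySem.List.length_pyRange_one]; omega
  rw [← hfull, ← hlen, List.take_left]

theorem pvMain (arr : List (List Int)) (flag : Int) (hne : arr ≠ [])
    (hrow : ∀ row ∈ arr, arr.length ≤ row.length) :
    pieceOfArray arr flag = pieceOfArray_alt arr flag := by
  simp only [pieceOfArray, pieceOfArray_alt]
  set n : Int := (arr.length : Int) with hn
  rw [pvStateEq arr flag]
  set b := pieceOfArrayBox arr flag n 0 n with hb
  have hnpos : (1 : Int) ≤ n := by
    have : 0 < arr.length := List.length_pos_iff.mpr hne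
    omega
  refine Prod.ext ?_ rfl
  simp only
  rcases pvBoxBounds arr flag n (n - 0).toNat 0 n (le_refl _) (le_refl 0) (le_refl n) with h | h
  · -- sentinel: no flag anywhere; both crops are empty
    rw [← hb] at h
    rw [h]
    simp only
    rw [PySem.List.pyRange_one_eq_nil (by omega : (0:Int) + 1 ≤ n)]
    rw [PySem.List.slice_toNat arr (by omega) (by omega)]
    have : n.toNat = arr.length := by omega
    rw [this, List.drop_length]
    simp
  · rw [← hb] at h
    obtain ⟨q1, q2, q3, q4, q5, q6⟩ := h
    have houter :
        (PySem.List.pyRange b.1 (b.2.2.1 + 1)).map (fun i => PySem.List.pyGetD arr i [])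
          = PySem.List.slice arr (some b.1) (some (b.2.2.1 + 1)) :=
      pvMapRangeSlice arr b.1 (b.2.2.1 + 1) [] (by omega) (by omega) (by omega)
    calc (PySem.List.pyRange b.1 (b.2.2.1 + 1)).map (fun i =>
            (PySem.List.pyRange b.2.1 (b.2.2.2 + 1)).map (fun j =>
              PySem.List.pyGetD (PySem.List.pyGetD arr i []) j 0))
        = ((PySem.List.pyRange b.1 (b.2.2.1 + 1)).map (fun i => PySem.List.pyGetD arr i [])).map
            (fun row => (PySem.List.pyRange b.2.1 (b.2.2.2 + 1)).map
              (fun j => PySem.List.pyGetD row j 0)) := by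
          rw [List.map_map]
          rfl
      _ = (PySem.List.slice arr (some b.1) (some (b.2.2.1 + 1))).map
            (fun row => (PySem.List.pyRange b.2.1 (b.2.2.2 + 1)).map
              (fun j => PySem.List.pyGetD row j 0)) := by
          rw [houter]
      _ = (PySem.List.slice arr (some b.1) (some (b.2.2.1 + 1))).map
            (fun row => PySem.List.slice row (some b.2.1) (some (b.2.2.2 + 1))) := by
          apply List.map_congr_left
          intro row hrowmem
          have hmem : row ∈ arr := PySem.List.mem_of_mem_slice arr _ _ hrowmem
          have hlen : n ≤ (row.length : Int) := by
            have := hrow row hmem; omega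
          exact pvMapRangeSlice row b.2.1 (b.2.2.2 + 1) 0 (by omega) (by omega) (by omega)

-- ===== VERDICT (by name: the statement is the Claim_ definition above) =====
theorem pieceOfArray_spec : Claim_equal_pieceOfArray := by
  intro arr flag _ hpre
  obtain ⟨h1, h2⟩ := hpre
  unfold Spec_pieceOfArray
  exact pvMain arr flag h1 h2
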